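-- pv_equiv track=rewrite | github.com/IggyIkenna/unified-trading-system-ui | _reference/deployment-api/deployment_api/workers/deployment_processor.py | _parse_exec_name
-- ===== SOURCE A (Python) =====
-- def _parse_exec_name(name: str) -> tuple[str | None, str | None]:
--     """Parse Cloud Run execution name into (region, job_name)."""
--     parts = name.split("/")
--     region: str | None = None
--     job_name: str | None = None
--     for i, p in enumerate(parts):
--         if p == "locations" and i + 1 < len(parts):
--             region = parts[i + 1]
--         if p == "jobs" and i + 1 < len(parts):
--             job_name = parts[i + 1]
--     return region, job_name
-- ===== SOURCE B (Python) =====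
-- def _parse_exec_name(name: str) -> tuple:
--     """Parse Cloud Run execution name into (region, job_name)."""
--     parts = name.split("/")
--     follower = dict(zip(parts, parts[1:]))
--     return follower.get("locations"), follower.get("jobs")
-- ===== Notes on version B (the rewrite author's own statement) =====
-- stated objective: idiomatic
-- what changed: Replaces the index-based marker scan with building a successor dictionary (dict(zip(parts, parts[1:]))) once and doing two flat .get lookups; last-write-wins on duplicate keys matches A's overwrite behaviour.
import Mathlib
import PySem

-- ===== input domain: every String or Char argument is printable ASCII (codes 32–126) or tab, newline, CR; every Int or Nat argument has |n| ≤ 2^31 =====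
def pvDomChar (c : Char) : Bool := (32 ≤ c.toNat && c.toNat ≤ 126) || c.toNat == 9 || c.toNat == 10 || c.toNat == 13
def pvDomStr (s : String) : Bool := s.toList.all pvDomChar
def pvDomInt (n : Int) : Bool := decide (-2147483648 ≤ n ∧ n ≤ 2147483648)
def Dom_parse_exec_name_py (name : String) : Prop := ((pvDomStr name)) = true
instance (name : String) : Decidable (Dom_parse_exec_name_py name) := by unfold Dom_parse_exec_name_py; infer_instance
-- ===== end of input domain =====

-- B replaces A's index-based marker scan by an idiomatic successor dictionary built once
-- (dict(zip(parts, parts[1:]))) followed by two flat lookups; return value is proved equal.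

-- ===== PORT A =====
def parse_exec_name_py (name : String) : Option String × Option String :=
  let parts := (PySem.Str.split? name "/").getD []
  (PySem.List.enumerate parts).foldl
    (fun (s : Option String × Option String) ip =>
      let s1 := if ip.2 = "locations" ∧ ip.1 + 1 < (parts.length : Int) then
                  (PySem.List.pyGet? parts (ip.1 + 1), s.2) else s
      if ip.2 = "jobs" ∧ ip.1 + 1 < (parts.length : Int) then
        (s1.1, PySem.List.pyGet? parts (ip.1 + 1)) else s1)
    (none, none)

-- ===== PORT B =====
def parse_exec_name_py_alt (name : String) : Option String × Option String :=
  let parts := (PySem.Str.split? name "/").getD []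
  let follower := (List.zip parts (PySem.List.slice parts (some 1) none)).foldl
    (fun (d : PySem.Dict String String) kv => d.insert kv.1 kv.2) PySem.Dict.empty
  (follower.get? "locations", follower.get? "jobs")

-- ===== PRECONDITION & SPEC =====
def Spec_parse_exec_name_py (name : String) (out : Option String × Option String) : Prop := out = parse_exec_name_py_alt name
instance (name : String) (out : Option String × Option String) : Decidable (Spec_parse_exec_name_py name out) := by unfold Spec_parse_exec_name_py; infer_instance

-- ===== CLAIM (what is proved, stated in full; the proofs are below) =====
def Claim_equal_parse_exec_name_py : Prop := ∀ (name : String), Dom_parse_exec_name_py name → Spec_parse_exec_name_py name (parse_exec_name_py name)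

-- ===== LEMMAS AND PROOFS =====

/-- A's loop step, over (index, element), reading neighbours in `full`. -/
def pvStepA (full : List String) (s : Option String × Option String) (ip : Int × String) :
    Option String × Option String :=
  let s1 := if ip.2 = "locations" ∧ ip.1 + 1 < (full.length : Int) then
              (PySem.List.pyGet? full (ip.1 + 1), s.2) else s
  if ip.2 = "jobs" ∧ ip.1 + 1 < (full.length : Int) then
    (s1.1, PySem.List.pyGet? full (ip.1 + 1)) else s1

/-- Index-free step over adjacent pairs (the common intermediate form). -/
def pvStepZ (s : Option String × Option String) (kv : String × String) :
    Option String × Option String :=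
  let s1 := if kv.1 = "locations" then (some kv.2, s.2) else s
  if kv.1 = "jobs" then (s1.1, some kv.2) else s1

theorem pvFoldA_eq_foldZ (full : List String) :
    ∀ (l : List String) (n : Nat), full.drop n = l → ∀ s,
      (PySem.List.enumerate l (n : Int)).foldl (pvStepA full) s
        = (List.zip l l.tail).foldl pvStepZ s := by
  intro l
  induction l with
  | nil => intro n _ s; simp [PySem.List.enumerate_nil]
  | cons a l ih =>
    intro n hdrop s
    have hn : n ≤ full.length := by
      by_contra h
      rw [List.drop_eq_nil_of_le (by omega)] at hdrop
      simp at hdrop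
    have hlen : full.length = n + (a :: l).length := by
      have := congrArg List.length hdrop
      simp only [List.length_drop] at this
      simp only [← this]; omega
    rw [PySem.List.enumerate_cons]
    cases l with
    | nil =>
      have hb : ¬ ((n : Int) + 1 < (full.length : Int)) := by
        rw [hlen]; push_cast [List.length_cons, List.length_nil]; omega
      simp [PySem.List.enumerate_nil, pvStepA, hb]
    | cons b l' =>
      have hdrop' : full.drop (n + 1) = b :: l' := by
        have := congrArg List.tail hdrop
        simpa [List.tail_drop] using this
      have hb : (n : Int) + 1 < (full.length : Int) := by
        rw [hlen]; push_cast [List.length_cons]; omega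
      have hget : PySem.List.pyGet? full ((n : Int) + 1) = some b := by
        have hc : ((n : Int) + 1) = ((n + 1 : Nat) : Int) := by push_cast; ring
        rw [hc, PySem.List.pyGet?_natCast]
        have h0 : full[(n + 1) + 0]? = some b := by
          rw [← List.getElem?_drop, hdrop']; rfl
        simpa using h0
      have hstep : pvStepA full s ((n : Int), a) = pvStepZ s (a, b) := by
        simp only [pvStepA, pvStepZ, hget, hb, and_true]
      have hc : ((n : Int) + 1) = ((n + 1 : Nat) : Int) := by push_cast; ring
      simp only [List.foldl_cons, List.tail_cons, List.zip_cons_cons]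
      rw [hc, ih (n + 1) hdrop', hstep, List.tail_cons]

theorem pvDict_fold_eq_foldZ :
    ∀ (pairs : List (String × String)) (d : PySem.Dict String String)
      (s : Option String × Option String),
      d.get? "locations" = s.1 → d.get? "jobs" = s.2 →
      ((pairs.foldl (fun d kv => d.insert kv.1 kv.2) d).get? "locations",
       (pairs.foldl (fun d kv => d.insert kv.1 kv.2) d).get? "jobs")
        = pairs.foldl pvStepZ s := by
  intro pairs
  induction pairs with
  | nil => intro d s h1 h2; simp [h1, h2]
  | cons kv pairs ih =>
    intro d s h1 h2
    simp only [List.foldl_cons]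
    apply ih
    · rw [PySem.Dict.get?_insert]
      simp only [pvStepZ]
      by_cases hk : kv.1 = "locations" <;> by_cases hj : kv.1 = "jobs"
      · rw [hk] at hj; exact absurd hj (by decide)
      · simp [hk]
      · simp [hj, h1]
      · simp [Ne.symm hk, hk, hj, h1]
    · rw [PySem.Dict.get?_insert]
      simp only [pvStepZ]
      by_cases hk : kv.1 = "locations" <;> by_cases hj : kv.1 = "jobs"
      · rw [hk] at hj; exact absurd hj (by decide)
      · simp [hk, h2]
      · simp [hj]
      · simp [Ne.symm hj, hk, hj, h2]

-- ===== VERDICT (by name: the statement is the Claim_ definition above) =====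
theorem parse_exec_name_py_spec : Claim_equal_parse_exec_name_py := by
  intro name _
  unfold Spec_parse_exec_name_py parse_exec_name_py parse_exec_name_py_alt
  simp only [PySem.List.slice_from_one]
  have hA := pvFoldA_eq_foldZ ((PySem.Str.split? name "/").getD []) ((PySem.Str.split? name "/").getD [])
    0 (by simp) ((none, none) : Option String × Option String)
  have hB := pvDict_fold_eq_foldZ
    (List.zip ((PySem.Str.split? name "/").getD []) ((PySem.Str.split? name "/").getD []).tail)
    PySem.Dict.empty ((none, none) : Option String × Option String) (by simp) (by simp)
  simp only [Nat.cast_zero] at hA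
  calc (PySem.List.enumerate ((PySem.Str.split? name "/").getD [])).foldl
        (pvStepA ((PySem.Str.split? name "/").getD [])) (none, none)
      = (List.zip ((PySem.Str.split? name "/").getD []) ((PySem.Str.split? name "/").getD []).tail).foldl
          pvStepZ (none, none) := hA
    _ = _ := hB.symm
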